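-- pv_equiv track=rewrite | github.com/kalyan20004/Daily_Programming_Challenge_2024 | sorting_into_two_arrays_day4.py | sorting_into_two_arrays
-- ===== SOURCE A (Python) =====
-- def sorting_into_two_arrays(arr1,arr2):
--     arr1.sort()
--     arr2.sort()
--     while(arr1[-1]>arr2[0]):
--         arr1[-1],arr2[0] = arr2[0],arr1[-1]
--         arr1.sort()
--         arr2.sort()
--     return arr1,arr2
-- ===== SOURCE B (Python) =====
-- def sorting_into_two_arrays(arr1, arr2):
--     # Sort the concatenation once, then split at len(arr1).
--     # (Note: unlike A, this does not mutate its arguments in place;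
--     # equivalence is about the return value.)
--     merged = sorted(arr1 + arr2)
--     n = len(arr1)
--     return merged[:n], merged[n:]
-- ===== Notes on version B (the rewrite author's own statement) =====
-- stated objective: faster
-- what changed: Replaces A's repeated swap-max/min-and-resort loop with a single sort of the concatenation split at len(arr1).
import Mathlib
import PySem

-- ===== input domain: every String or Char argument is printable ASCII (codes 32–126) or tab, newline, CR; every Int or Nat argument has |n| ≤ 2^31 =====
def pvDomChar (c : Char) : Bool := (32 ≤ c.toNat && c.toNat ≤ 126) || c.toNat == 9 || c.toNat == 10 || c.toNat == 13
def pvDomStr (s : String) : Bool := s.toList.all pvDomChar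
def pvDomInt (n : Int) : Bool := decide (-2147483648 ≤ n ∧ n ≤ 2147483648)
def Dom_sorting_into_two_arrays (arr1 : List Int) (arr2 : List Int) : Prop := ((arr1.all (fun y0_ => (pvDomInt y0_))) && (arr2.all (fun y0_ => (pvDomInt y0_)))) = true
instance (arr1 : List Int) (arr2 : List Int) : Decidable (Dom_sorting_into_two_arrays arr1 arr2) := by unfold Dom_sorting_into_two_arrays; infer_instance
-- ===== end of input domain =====

-- B replaces A's repeated swap-and-resort loop by one sort of the concatenation split at
-- len(arr1); A sorts its arguments in place (B does not) — the claim is about the return value.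

-- ===== PORT A =====
-- Termination measure for A's while loop: the number of pairs (x from arr1, b from arr2) with b < x.
def pvInvCount (a1 a2 : List Int) : Nat :=
  (a1.map (fun x => a2.countP (fun b => decide (b < x)))).sum

theorem pvInvCount_dec (xs t : List Int) (m M : Int) (h : m < M) :
    pvInvCount (xs ++ [m]) (M :: t) < pvInvCount (xs ++ [M]) (m :: t) := by
  simp only [pvInvCount, List.map_append, List.sum_append, List.map_cons, List.map_nil,
    List.sum_cons, List.sum_nil, List.countP_cons]
  have hle : ((xs.map (fun x => if M < x then (1:Nat) else 0)).sum)
      ≤ ((xs.map (fun x => if m < x then (1:Nat) else 0)).sum) := by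
    apply List.sum_le_sum
    intro x _
    by_cases hMx : M < x
    · simp [hMx, lt_trans h hMx]
    · simp [hMx]
  have h2 : (t.countP fun b => decide (b < m)) ≤ (t.countP fun b => decide (b < M)) := by
    apply List.countP_mono_left
    intro b _ hb
    simp only [decide_eq_true_eq] at *
    exact lt_trans hb h
  have hMm : ¬ (M < m) := not_lt.mpr (le_of_lt h)
  simp [hMm, h]
  omega

theorem pvInvCount_perm (a1 a1' a2 a2' : List Int) (h1 : a1.Perm a1') (h2 : a2.Perm a2') :
    pvInvCount a1 a2 = pvInvCount a1' a2' := by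
  unfold pvInvCount
  have : ∀ x, a2.countP (fun b => decide (b < x)) = a2'.countP (fun b => decide (b < x)) :=
    fun x => h2.countP_eq _
  simp only [this]
  exact (h1.map _).sum_eq

-- loop body of A: arguments arrive sorted; swap arr1[-1] ↔ arr2[0] and re-sort, as in the Python.
def pvLoopA (a1 a2 : List Int) : List Int × List Int :=
  match h1 : PySem.List.pyGet? a1 (-1), h2 : PySem.List.pyGet? a2 0 with
  | some M, some m =>
    if hMm : m < M then
      pvLoopA (PySem.List.sorted (a1.dropLast ++ [m]) (fun x => x) false)
              (PySem.List.sorted (M :: a2.tail) (fun x => x) false)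
    else (a1, a2)
  | _, _ => (a1, a2)   -- Python raises IndexError here (empty list); excluded by Pre_
termination_by pvInvCount a1 a2
decreasing_by
  have hL : a1.getLast? = some M := by rwa [PySem.List.pyGet?_neg_one] at h1
  have hne : a1 ≠ [] := by intro hnil; simp [hnil] at hL
  have ha1 : a1.dropLast ++ [M] = a1 := by
    have h' := List.dropLast_append_getLast hne
    have hM : a1.getLast hne = M := by
      rw [List.getLast?_eq_some_getLast hne] at hL
      exact Option.some_inj.mp hL
    rw [hM] at h'; exact h'
  have hH : a2.head? = some m := by
    rw [PySem.List.pyGet?_zero, ← List.head?_eq_getElem?] at h2; exact h2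
  have ha2 : a2 = m :: a2.tail := (List.cons_head?_tail hH).symm
  calc pvInvCount (PySem.List.sorted (a1.dropLast ++ [m]) (fun x => x) false)
          (PySem.List.sorted (M :: a2.tail) (fun x => x) false)
      = pvInvCount (a1.dropLast ++ [m]) (M :: a2.tail) :=
        pvInvCount_perm _ _ _ _ (PySem.List.sorted_perm _ _ _) (PySem.List.sorted_perm _ _ _)
    _ < pvInvCount (a1.dropLast ++ [M]) (m :: a2.tail) := pvInvCount_dec _ _ _ _ hMm
    _ = pvInvCount a1 a2 := by rw [ha1, ← ha2]

def sorting_into_two_arrays (arr1 : List Int) (arr2 : List Int) : List Int × List Int :=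
  pvLoopA (PySem.List.sorted arr1 (fun x => x) false) (PySem.List.sorted arr2 (fun x => x) false)

-- ===== PORT B =====
def sorting_into_two_arrays_alt (arr1 : List Int) (arr2 : List Int) : List Int × List Int :=
  let merged := PySem.List.sorted (arr1 ++ arr2) (fun x => x) false
  let n := PySem.List.len arr1
  (PySem.List.slice merged none (some n), PySem.List.slice merged (some n) none)

-- ===== PRECONDITION & SPEC =====
-- Pre_ excludes exactly the inputs on which A raises IndexError (arr1[-1] / arr2[0] on an empty list).
def Pre_sorting_into_two_arrays (arr1 : List Int) (arr2 : List Int) : Prop :=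
  arr1 ≠ [] ∧ arr2 ≠ []
instance (arr1 : List Int) (arr2 : List Int) : Decidable (Pre_sorting_into_two_arrays arr1 arr2) := by
  unfold Pre_sorting_into_two_arrays; infer_instance

def pvWitness_sorting_into_two_arrays : List Int × List Int := ([3, 1], [2, 0])

def Spec_sorting_into_two_arrays (arr1 : List Int) (arr2 : List Int) (out : List Int × List Int) : Prop := out = sorting_into_two_arrays_alt arr1 arr2
instance (arr1 : List Int) (arr2 : List Int) (out : List Int × List Int) : Decidable (Spec_sorting_into_two_arrays arr1 arr2 out) := by unfold Spec_sorting_into_two_arrays; infer_instance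

-- ===== CLAIM (what is proved, stated in full; the proofs are below) =====
def Claim_equal_sorting_into_two_arrays : Prop := ∀ (arr1 : List Int) (arr2 : List Int), Dom_sorting_into_two_arrays arr1 arr2 → Pre_sorting_into_two_arrays arr1 arr2 → Spec_sorting_into_two_arrays arr1 arr2 (sorting_into_two_arrays arr1 arr2)

-- ===== LEMMAS AND PROOFS =====

theorem pvLoopA_spec_aux (n : Nat) : ∀ (a1 a2 : List Int), pvInvCount a1 a2 < n →
    a1 ≠ [] → a2 ≠ [] → a1.Pairwise (· ≤ ·) → a2.Pairwise (· ≤ ·) →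
    pvLoopA a1 a2 =
      ((PySem.List.sorted (a1 ++ a2) (fun x => x) false).take a1.length,
       (PySem.List.sorted (a1 ++ a2) (fun x => x) false).drop a1.length) := by
  induction n with
  | zero => intro _ _ h; omega
  | succ n ih =>
    intro a1 a2 hlt h1 h2 s1 s2
    rw [pvLoopA]
    split
    case h_2 habs =>
      exfalso
      obtain ⟨M, hL⟩ : ∃ M, a1.getLast? = some M := by
        cases hc : a1.getLast? with
        | none => exact absurd (List.getLast?_eq_none_iff.mp hc) h1
        | some M => exact ⟨M, rfl⟩
      obtain ⟨m, hH⟩ : ∃ m, a2.head? = some m := by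
        cases hc : a2.head? with
        | none => exact absurd (List.head?_eq_none_iff.mp hc) h2
        | some m => exact ⟨m, rfl⟩
      exact habs M m (by rw [PySem.List.pyGet?_neg_one]; exact hL)
        (by rw [PySem.List.pyGet?_zero, ← List.head?_eq_getElem?]; exact hH)
    case h_1 M m hM hm =>
      have hL : a1.getLast? = some M := by rwa [PySem.List.pyGet?_neg_one] at hM
      have ha1 : a1.dropLast ++ [M] = a1 := by
        have h' := List.dropLast_append_getLast h1
        have hMe : a1.getLast h1 = M := by
          rw [List.getLast?_eq_some_getLast h1] at hL
          exact Option.some_inj.mp hL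
        rw [hMe] at h'; exact h'
      have hH : a2.head? = some m := by
        rw [PySem.List.pyGet?_zero, ← List.head?_eq_getElem?] at hm; exact hm
      have ha2 : a2 = m :: a2.tail := (List.cons_head?_tail hH).symm
      split
      case isTrue hMm =>
        -- recursive case: swap and re-sort, then use the induction hypothesis
        set s1' := PySem.List.sorted (a1.dropLast ++ [m]) (fun x => x) false with hs1'
        set s2' := PySem.List.sorted (M :: a2.tail) (fun x => x) false with hs2'
        have hperm1 : s1'.Perm (a1.dropLast ++ [m]) := PySem.List.sorted_perm _ _ _
        have hperm2 : s2'.Perm (M :: a2.tail) := PySem.List.sorted_perm _ _ _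
        have hkey : ((a1.dropLast ++ [m]) ++ (M :: a2.tail)).Perm (a1 ++ a2) := by
          conv_rhs => rw [← ha1, ha2]
          simp only [List.append_assoc, List.singleton_append]
          exact List.Perm.append_left _ (List.Perm.swap _ _ _)
        have hperm : (s1' ++ s2').Perm (a1 ++ a2) :=
          (hperm1.append hperm2).trans hkey
        have hcnt : pvInvCount s1' s2' < pvInvCount a1 a2 := by
          calc pvInvCount s1' s2'
              = pvInvCount (a1.dropLast ++ [m]) (M :: a2.tail) :=
                pvInvCount_perm _ _ _ _ hperm1 hperm2
            _ < pvInvCount (a1.dropLast ++ [M]) (m :: a2.tail) := pvInvCount_dec _ _ _ _ hMm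
            _ = pvInvCount a1 a2 := by rw [ha1, ← ha2]
        have hlen : s1'.length = a1.length := by
          rw [hs1', PySem.List.length_sorted, List.length_append]
          conv_rhs => rw [← ha1]
          simp
        have hres := ih s1' s2' (by omega)
          (by
            intro hnil
            rw [hs1', PySem.List.sorted_eq_nil_iff] at hnil
            simp at hnil)
          (by
            intro hnil
            rw [hs2', PySem.List.sorted_eq_nil_iff] at hnil
            simp at hnil)
          (by simpa using PySem.List.sorted_pairwise (a1.dropLast ++ [m]) (fun x => x))
          (by simpa using PySem.List.sorted_pairwise (M :: a2.tail) (fun x => x))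
        rw [hres, hlen,
          PySem.List.sorted_eq_sorted_of_perm (s1' ++ s2') (a1 ++ a2) (fun x => x)
            (fun _ _ h => h) hperm]
      case isFalse hMm =>
        -- terminal case: arr1's max ≤ arr2's min, so a1 ++ a2 is already sorted
        have hMle : M ≤ m := not_lt.mp hMm
        have hx1 : ∀ x ∈ a1, x ≤ M := by
          intro x hx
          rw [← ha1] at hx s1
          rcases List.mem_append.mp hx with hx | hx
          · exact (List.pairwise_append.mp s1).2.2 x hx M (List.mem_singleton.mpr rfl)
          · rw [List.mem_singleton.mp hx]
        have hx2 : ∀ y ∈ a2, m ≤ y := by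
          intro y hy
          rw [ha2] at hy s2
          rcases List.mem_cons.mp hy with heq | hy
          · exact le_of_eq heq.symm
          · exact (List.pairwise_cons.mp s2).1 y hy
        have hpw : (a1 ++ a2).Pairwise (· ≤ ·) := by
          rw [List.pairwise_append]
          exact ⟨s1, s2, fun x hx y hy => le_trans (le_trans (hx1 x hx) hMle) (hx2 y hy)⟩
        rw [PySem.List.sorted_eq_self_of_pairwise (a1 ++ a2) (fun x => x) hpw,
          List.take_left, List.drop_left]

theorem sorting_into_two_arrays_spec : Claim_equal_sorting_into_two_arrays := by
  intro a1 a2 _ hpre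
  obtain ⟨h1, h2⟩ := hpre
  unfold Spec_sorting_into_two_arrays sorting_into_two_arrays sorting_into_two_arrays_alt
  have hs1 : PySem.List.sorted a1 (fun x => x) false ≠ [] := by
    rw [Ne, PySem.List.sorted_eq_nil_iff]; exact h1
  have hs2 : PySem.List.sorted a2 (fun x => x) false ≠ [] := by
    rw [Ne, PySem.List.sorted_eq_nil_iff]; exact h2
  rw [pvLoopA_spec_aux (pvInvCount (PySem.List.sorted a1 (fun x => x) false)
        (PySem.List.sorted a2 (fun x => x) false) + 1) _ _ (by omega) hs1 hs2
      (by simpa using PySem.List.sorted_pairwise a1 (fun x => x))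
      (by simpa using PySem.List.sorted_pairwise a2 (fun x => x))]
  have hperm : ((PySem.List.sorted a1 (fun x => x) false) ++
      (PySem.List.sorted a2 (fun x => x) false)).Perm (a1 ++ a2) :=
    (PySem.List.sorted_perm _ _ _).append (PySem.List.sorted_perm _ _ _)
  rw [PySem.List.sorted_eq_sorted_of_perm _ _ (fun x => x) (fun _ _ h => h) hperm,
    PySem.List.length_sorted]
  simp [PySem.List.len_eq, PySem.List.slice_to_natCast, PySem.List.slice_from_natCast]
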